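-- pv_equiv track=rewrite | github.com/liuwei464976266/mygit | play/不朽情缘消消乐.py | getColsSymbol
-- ===== SOURCE A (Python) =====
-- def getColsSymbol(points):#取出各列中奖位置
--     symbol13_list = []
--     col1, col2, col3, col4, col5 = {}, {}, {}, {}, {}
--     for i in range(len(points)):
--         if points[i] == 13:
--             symbol13_list.append(i)
--         elif i % 5 == 0:
--             col1[i] = points[i]
--         elif i % 5 == 1:
--             col2[i] = points[i]
--         elif i % 5 == 2:
--             col3[i] = points[i]
--         elif i % 5 == 3:
--             col4[i] = points[i]
--         elif i % 5 == 4: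
--             col5[i] = points[i]
--     return col1,col2,col3,col4,col5,symbol13_list
-- ===== SOURCE B (Python) =====
-- def getColsSymbol(points):  # staged passes: 13-positions first, then one strided dict comprehension per column
--     n = len(points)
--     symbol13_list = [i for i, v in enumerate(points) if v == 13]
--     col1 = {i: points[i] for i in range(0, n, 5) if points[i] != 13}
--     col2 = {i: points[i] for i in range(1, n, 5) if points[i] != 13}
--     col3 = {i: points[i] for i in range(2, n, 5) if points[i] != 13}
--     col4 = {i: points[i] for i in range(3, n, 5) if points[i] != 13}
--     col5 = {i: points[i] for i in range(4, n, 5) if points[i] != 13}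
--     return col1, col2, col3, col4, col5, symbol13_list
-- ===== Notes on version B (the rewrite author's own statement) =====
-- stated objective: alternative
-- what changed: Replaces A's single pass with a 5-way if/elif dispatch by six independent staged passes: a comprehension collecting the 13-positions, then one strided dict comprehension per column over range(k, n, 5), so no per-element column selection happens at all.
import Mathlib
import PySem

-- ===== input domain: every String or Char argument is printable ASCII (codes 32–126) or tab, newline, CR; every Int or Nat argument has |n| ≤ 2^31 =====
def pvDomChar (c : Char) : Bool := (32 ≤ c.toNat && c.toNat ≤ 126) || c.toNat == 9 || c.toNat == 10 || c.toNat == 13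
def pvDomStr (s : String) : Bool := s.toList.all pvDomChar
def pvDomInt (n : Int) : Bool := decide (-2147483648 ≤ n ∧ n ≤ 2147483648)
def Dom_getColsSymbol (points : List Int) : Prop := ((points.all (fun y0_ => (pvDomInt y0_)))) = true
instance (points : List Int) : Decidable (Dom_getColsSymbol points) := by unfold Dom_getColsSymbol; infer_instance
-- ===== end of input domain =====

-- B replaces A's single accumulating pass (5-way if/elif dispatch into five named
-- dicts) by six independent staged passes: one comprehension for the 13-positions and
-- one strided dict comprehension per column over range(k, n, 5) (alternative; same cost).

-- ===== PORT A =====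
def getColsSymbol (points : List Int) : (List (Int × Int)) × (List (Int × Int)) × (List (Int × Int)) × (List (Int × Int)) × (List (Int × Int)) × List Int :=
  let r := (PySem.List.pyRange 0 (points.length : Int) 1).foldl
    (fun st i =>
      match st with
      | (c1, c2, c3, c4, c5, s) =>
        let v := PySem.List.pyGetD points i 0
        if v == 13 then (c1, c2, c3, c4, c5, s ++ [i])
        else if PySem.Int.mod i 5 == 0 then (c1.insert i v, c2, c3, c4, c5, s)
        else if PySem.Int.mod i 5 == 1 then (c1, c2.insert i v, c3, c4, c5, s)
        else if PySem.Int.mod i 5 == 2 then (c1, c2, c3.insert i v, c4, c5, s)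
        else if PySem.Int.mod i 5 == 3 then (c1, c2, c3, c4.insert i v, c5, s)
        else if PySem.Int.mod i 5 == 4 then (c1, c2, c3, c4, c5.insert i v, s)
        else (c1, c2, c3, c4, c5, s))
    (PySem.Dict.empty, PySem.Dict.empty, PySem.Dict.empty, PySem.Dict.empty, PySem.Dict.empty, ([] : List Int))
  (r.1.items, r.2.1.items, r.2.2.1.items, r.2.2.2.1.items, r.2.2.2.2.1.items, r.2.2.2.2.2)

-- ===== PORT B =====
-- one strided dict comprehension: {i: points[i] for i in range(k, n, 5) if points[i] != 13}
def altCol (points : List Int) (k : Int) : PySem.Dict Int Int :=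
  (PySem.List.pyRange k (points.length : Int) 5).foldl
    (fun d i =>
      if PySem.List.pyGetD points i 0 ≠ 13 then d.insert i (PySem.List.pyGetD points i 0) else d)
    PySem.Dict.empty

def getColsSymbol_alt (points : List Int) : (List (Int × Int)) × (List (Int × Int)) × (List (Int × Int)) × (List (Int × Int)) × (List (Int × Int)) × List Int :=
  let symbol13 := ((PySem.List.enumerate points 0).filter (fun p => p.2 == 13)).map (·.1)
  ((altCol points 0).items, (altCol points 1).items, (altCol points 2).items,
   (altCol points 3).items, (altCol points 4).items, symbol13)

-- ===== PRECONDITION & SPEC =====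
def Spec_getColsSymbol (points : List Int) (out : (List (Int × Int)) × (List (Int × Int)) × (List (Int × Int)) × (List (Int × Int)) × (List (Int × Int)) × List Int) : Prop := out = getColsSymbol_alt points
instance (points : List Int) (out : (List (Int × Int)) × (List (Int × Int)) × (List (Int × Int)) × (List (Int × Int)) × (List (Int × Int)) × List Int) : Decidable (Spec_getColsSymbol points out) := by
  unfold Spec_getColsSymbol
  haveI h1 : DecidableEq (List (Int × Int) × List (Int × Int) × List Int) := fun x y => decEq x y
  haveI h2 : DecidableEq (List (Int × Int) × List (Int × Int) × List (Int × Int) × List Int) := fun x y => @instDecidableEqProd _ _ _ h1 x y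
  haveI h3 : DecidableEq (List (Int × Int) × List (Int × Int) × List (Int × Int) × List (Int × Int) × List Int) := fun x y => @instDecidableEqProd _ _ _ h2 x y
  haveI h4 : DecidableEq (List (Int × Int) × List (Int × Int) × List (Int × Int) × List (Int × Int) × List (Int × Int) × List Int) := fun x y => @instDecidableEqProd _ _ _ h3 x y
  exact h4 out _

-- ===== CLAIM (what is proved, stated in full; the proofs are below) =====
def Claim_equal_getColsSymbol : Prop := ∀ (points : List Int), Dom_getColsSymbol points → Spec_getColsSymbol points (getColsSymbol points)

-- ===== LEMMAS AND PROOFS =====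

-- the elements of l that land in column k (value ≠ 13, index ≡ k mod 5)
def pvFilt (k : Int) (l : List (Int × Int)) : List (Int × Int) :=
  l.filter (fun p => decide (p.2 ≠ 13) && decide (p.1 % 5 = k))

-- insert a batch of pairs into a dict, left to right
def pvInsertAll (d : PySem.Dict Int Int) (l : List (Int × Int)) : PySem.Dict Int Int :=
  l.foldl (fun d p => d.insert p.1 p.2) d

-- A's per-element step, on (index, value) pairs
def pvStep (st : PySem.Dict Int Int × PySem.Dict Int Int × PySem.Dict Int Int × PySem.Dict Int Int × PySem.Dict Int Int × List Int)
    (p : Int × Int) : PySem.Dict Int Int × PySem.Dict Int Int × PySem.Dict Int Int × PySem.Dict Int Int × PySem.Dict Int Int × List Int :=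
  match st with
  | (c1, c2, c3, c4, c5, s) =>
    if p.2 == 13 then (c1, c2, c3, c4, c5, s ++ [p.1])
    else if PySem.Int.mod p.1 5 == 0 then (c1.insert p.1 p.2, c2, c3, c4, c5, s)
    else if PySem.Int.mod p.1 5 == 1 then (c1, c2.insert p.1 p.2, c3, c4, c5, s)
    else if PySem.Int.mod p.1 5 == 2 then (c1, c2, c3.insert p.1 p.2, c4, c5, s)
    else if PySem.Int.mod p.1 5 == 3 then (c1, c2, c3, c4.insert p.1 p.2, c5, s)
    else if PySem.Int.mod p.1 5 == 4 then (c1, c2, c3, c4, c5.insert p.1 p.2, s)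
    else (c1, c2, c3, c4, c5, s)

lemma pvFilt_cons (k i v : Int) (rest : List (Int × Int)) :
    pvFilt k ((i, v) :: rest) =
      if v ≠ 13 ∧ i % 5 = k then (i, v) :: pvFilt k rest else pvFilt k rest := by
  simp only [pvFilt, List.filter_cons, Bool.and_eq_true, decide_eq_true_eq]

lemma pvInsertAll_cons (d : PySem.Dict Int Int) (i v : Int) (l : List (Int × Int)) :
    pvInsertAll d ((i, v) :: l) = pvInsertAll (d.insert i v) l := rfl

lemma pv_A_eq (points : List Int) :
    getColsSymbol points =
      (fun r : PySem.Dict Int Int × PySem.Dict Int Int × PySem.Dict Int Int × PySem.Dict Int Int × PySem.Dict Int Int × List Int =>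
        (r.1.items, r.2.1.items, r.2.2.1.items, r.2.2.2.1.items, r.2.2.2.2.1.items, r.2.2.2.2.2))
      ((PySem.List.enumerate points 0).foldl pvStep
        (PySem.Dict.empty, PySem.Dict.empty, PySem.Dict.empty, PySem.Dict.empty, PySem.Dict.empty, [])) := by
  rw [PySem.List.enumerate_eq_map_pyRange points 0, List.foldl_map]
  unfold getColsSymbol
  rfl

lemma pv_enum_nonneg (points : List Int) : ∀ p ∈ PySem.List.enumerate points 0, 0 ≤ p.1 := by
  intro p hp
  rw [PySem.List.mem_enumerate_iff] at hp
  obtain ⟨k, hk, rfl⟩ := hp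
  simp

-- A's single pass splits into six independent batches: one per column plus the 13-list
lemma pv_A_inv (l : List (Int × Int)) (h : ∀ p ∈ l, 0 ≤ p.1) :
    ∀ c1 c2 c3 c4 c5 s,
      l.foldl pvStep (c1, c2, c3, c4, c5, s) =
        (pvInsertAll c1 (pvFilt 0 l), pvInsertAll c2 (pvFilt 1 l), pvInsertAll c3 (pvFilt 2 l),
         pvInsertAll c4 (pvFilt 3 l), pvInsertAll c5 (pvFilt 4 l),
         s ++ (l.filter (fun p => p.2 == 13)).map (·.1)) := by
  induction l with
  | nil => intro c1 c2 c3 c4 c5 s; simp [pvInsertAll, pvFilt]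
  | cons p rest ih =>
    intro c1 c2 c3 c4 c5 s
    obtain ⟨i, v⟩ := p
    have hi : 0 ≤ i := h (i, v) (by simp)
    have hrest : ∀ p ∈ rest, 0 ≤ p.1 := fun p hp => h p (by simp [hp])
    by_cases hv : v = 13
    · subst hv
      simp [List.foldl, pvStep, pvFilt_cons, ih hrest]
    · have h5 : i % 5 = 0 ∨ i % 5 = 1 ∨ i % 5 = 2 ∨ i % 5 = 3 ∨ i % 5 = 4 := by omega
      rcases h5 with h5 | h5 | h5 | h5 | h5 <;>
        simp [List.foldl, pvStep, hv, h5, pvFilt_cons, pvInsertAll_cons, ih hrest]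

-- the indices 0 ≤ j < n with j % 5 = k are exactly range(k, n, 5)
lemma pv_range5 (k : Int) (hk0 : 0 ≤ k) (hk5 : k < 5) (n : Nat) :
    (PySem.List.pyRange 0 (n : Int) 1).filter (fun j => decide (j % 5 = k)) =
      PySem.List.pyRange k (n : Int) 5 := by
  induction n with
  | zero =>
    rw [PySem.List.pyRange_one_eq_nil (by norm_num), Nat.cast_zero,
      PySem.List.pyRange_of_pos k 0 (by norm_num : (0 : Int) < 5)]
    simp
    omega
  | succ n ih =>
    have hcast : ((n + 1 : Nat) : Int) = (n : Int) + 1 := by push_cast; ring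
    rw [hcast, PySem.List.pyRange_one_succ_right (by positivity), List.filter_append, ih]
    rw [PySem.List.pyRange_of_pos k ((n : Int) + 1) (by norm_num : (0 : Int) < 5),
        PySem.List.pyRange_of_pos k (n : Int) (by norm_num : (0 : Int) < 5)]
    by_cases h : (n : Int) % 5 = k
    · have hcnt : (if k < (n : Int) + 1 then (((n : Int) + 1 - k + 5 - 1) / 5).toNat else 0) =
          (if k < (n : Int) then (((n : Int) - k + 5 - 1) / 5).toNat else 0) + 1 := by
        split_ifs <;> omega
      rw [hcnt, List.range_succ, List.map_append]
      simp [h]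
      split_ifs <;> omega
    · have hcnt : (if k < (n : Int) + 1 then (((n : Int) + 1 - k + 5 - 1) / 5).toNat else 0) =
          (if k < (n : Int) then (((n : Int) - k + 5 - 1) / 5).toNat else 0) := by
        split_ifs <;> omega
      rw [hcnt]
      simp [h]

-- B's strided comprehension for column k builds exactly the batch pvFilt k (enumerate points)
lemma pv_B_col (points : List Int) (k : Int) (hk0 : 0 ≤ k) (hk5 : k < 5) :
    altCol points k = pvInsertAll PySem.Dict.empty (pvFilt k (PySem.List.enumerate points 0)) := by
  unfold altCol
  rw [PySem.List.foldl_ite_eq_foldl_filter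
    (fun i => PySem.List.pyGetD points i 0 ≠ 13)
    (fun (d : PySem.Dict Int Int) i => d.insert i (PySem.List.pyGetD points i 0))]
  have hbatch : pvFilt k (PySem.List.enumerate points 0) =
      ((PySem.List.pyRange k (points.length : Int) 5).filter
        (fun i => decide (PySem.List.pyGetD points i 0 ≠ 13))).map
        (fun i => (i, PySem.List.pyGetD points i 0)) := by
    rw [show PySem.List.enumerate points 0 = PySem.List.enumerate points from rfl,
        PySem.List.enumerate_eq_map_pyRange points 0]
    unfold pvFilt
    rw [List.filter_map]
    have hc : ((fun p : Int × Int => decide (p.2 ≠ 13) && decide (p.1 % 5 = k)) ∘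
        (fun j => (j, PySem.List.pyGetD points j 0))) =
        (fun j => decide (PySem.List.pyGetD points j 0 ≠ 13) && decide (j % 5 = k)) := by
      funext j; rfl
    rw [hc, ← List.filter_filter]
    simp only [PySem.List.len_eq]
    rw [pv_range5 k hk0 hk5 points.length]
  rw [hbatch]
  unfold pvInsertAll
  rw [List.foldl_map]

-- ===== VERDICT (by name: the statement is the Claim_ definition above) =====
theorem getColsSymbol_spec : Claim_equal_getColsSymbol := by
  intro points _
  unfold Spec_getColsSymbol getColsSymbol_alt
  rw [pv_A_eq points,
    pv_A_inv (PySem.List.enumerate points 0) (pv_enum_nonneg points)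
      PySem.Dict.empty PySem.Dict.empty PySem.Dict.empty PySem.Dict.empty PySem.Dict.empty [],
    pv_B_col points 0 (by norm_num) (by norm_num),
    pv_B_col points 1 (by norm_num) (by norm_num),
    pv_B_col points 2 (by norm_num) (by norm_num),
    pv_B_col points 3 (by norm_num) (by norm_num),
    pv_B_col points 4 (by norm_num) (by norm_num)]
  simp
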